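-- pv_equiv track=rewrite | github.com/MlvPrasadOfficial/SCALER_DSML_MAR_2022_SOLUTIONS_BY_MLV_PRASAD | AA_ASSIGNMENTS/Day023 - Intermediate DSA  Subsequences & Subsets/h02.py | solve
-- ===== SOURCE A (Python) =====
-- def solve(A):
--     def cnt(n):
--         return (n * (n + 1)) // 2
--     MOD = int(1e9 + 7)
--     ans = 0
--     n = len(A)
--     for b in range(27):
--         c = 0
--         C = cnt(n)
--         for i in range(n):
--             if A[i] & 1:
--                 C -= cnt(c)
--                 c = 0
--             else:
--                 c += 1
--             A[i] >>= 1
--         C -= cnt(c)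
--         ans = (ans + (1 << b) * C) % MOD
--     return ans
-- ===== SOURCE B (Python) =====
-- def solve(A):
--     # Return-value equivalent to A; note: A mutates its argument in place (A[i] >>= 27 overall), B does not.
--     MOD = 1000000007
--     ans = 0
--     for b in range(27):
--         last = -1
--         C = 0
--         for j, x in enumerate(A):
--             if (x >> b) & 1:
--                 last = j
--             C += last + 1
--         ans = (ans + (1 << b) * C) % MOD
--     return ans
-- ===== Notes on version B (the rewrite author's own statement) =====
-- stated objective: alternative
-- what changed: A counts, per bit, subarrays with a set bit as cnt(n) minus triangular counts of maximal zero-runs while shifting the array in place; B instead sums last+1 over right endpoints, where last is the index of the most recent element with that bit set, reading bit b directly via (x >> b) & 1 without mutating the input.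
import Mathlib
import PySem

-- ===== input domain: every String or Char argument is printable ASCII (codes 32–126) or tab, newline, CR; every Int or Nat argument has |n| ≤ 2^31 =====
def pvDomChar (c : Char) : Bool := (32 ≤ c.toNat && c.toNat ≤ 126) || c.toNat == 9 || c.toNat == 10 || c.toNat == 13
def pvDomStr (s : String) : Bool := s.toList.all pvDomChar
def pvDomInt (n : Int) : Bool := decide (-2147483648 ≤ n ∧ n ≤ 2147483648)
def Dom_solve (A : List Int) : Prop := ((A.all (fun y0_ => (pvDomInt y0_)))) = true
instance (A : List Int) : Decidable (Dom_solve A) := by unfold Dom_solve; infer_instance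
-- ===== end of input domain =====

-- B replaces A's per-bit zero-run triangular-count bookkeeping by a per-bit sweep that
-- tracks the index of the last set bit (alternative decomposition, same cost).
-- Note: Python A mutates its argument in place (each A[i] ends as A[i] >> 27); B does not;
-- the equivalence proved here is about the RETURN value only.

-- ===== PORT A =====
-- cnt(n) = (n * (n + 1)) // 2
def cntA (n : Int) : Int := PySem.Int.floordiv (n * (n + 1)) 2

-- inner 'for i in range(n)' loop of A: threads (C, c) and rebuilds the (mutated) list of A[i] >> 1
def innerA : List Int → Int → Int → (Int × Int) × List Int
  | [], C, c => ((C, c), [])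
  | x :: xs, C, c =>
    if PySem.Int.band x 1 ≠ 0 then
      let r := innerA xs (C - cntA c) 0
      (r.1, (x >>> (1:Nat)) :: r.2)
    else
      let r := innerA xs C (c + 1)
      (r.1, (x >>> (1:Nat)) :: r.2)

-- body of A's 'for b in range(27)' loop; state = (ans, current mutated list)
def stepA (n : Int) (s : Int × List Int) (b : Nat) : Int × List Int :=
  -- C2 = final C after the post-loop 'C -= cnt(c)'; MOD = int(1e9 + 7) = 1000000007 exactly
  (PySem.Int.mod (s.1 + ((1:Int) <<< b) * ((innerA s.2 (cntA n) 0).1.1 - cntA (innerA s.2 (cntA n) 0).1.2)) 1000000007,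
   (innerA s.2 (cntA n) 0).2)

def solve (A : List Int) : Int :=
  let n : Int := PySem.List.len A
  ((List.range 27).foldl (stepA n) ((0 : Int), A)).1

-- ===== PORT B =====
-- inner 'for j, x in enumerate(A)' loop of B: tracks last set-bit index, sums last + 1
def innerB : List Int → Nat → Int → Int → Int → Int
  | [], _, _, _, C => C
  | x :: xs, b, j, last, C =>
    let last' := if PySem.Int.band (x >>> b) 1 ≠ 0 then j else last
    innerB xs b (j + 1) last' (C + last' + 1)

-- body of B's 'for b in range(27)' loop
def stepB (A : List Int) (ans : Int) (b : Nat) : Int :=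
  PySem.Int.mod (ans + ((1:Int) <<< b) * innerB A b 0 (-1) 0) 1000000007

def solve_alt (A : List Int) : Int :=
  (List.range 27).foldl (stepB A) 0

-- ===== PRECONDITION & SPEC =====
def Spec_solve (A : List Int) (out : Int) : Prop := out = solve_alt A
instance (A : List Int) (out : Int) : Decidable (Spec_solve A out) := by unfold Spec_solve; infer_instance

-- ===== CLAIM (what is proved, stated in full; the proofs are below) =====
def Claim_equal_solve : Prop := ∀ (A : List Int), Dom_solve A → Spec_solve A (solve A)

-- ===== LEMMAS AND PROOFS =====

theorem cntA_zero : cntA 0 = 0 := by decide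

theorem cntA_succ (t : Int) : cntA (t + 1) = cntA t + (t + 1) := by
  obtain ⟨m, hm⟩ := Int.even_mul_succ_self t
  have h1 : t * (t + 1) = 2 * m := by omega
  have h2 : (t + 1) * (t + 1 + 1) = 2 * (m + t + 1) := by nlinarith [h1]
  unfold cntA
  rw [PySem.Int.floordiv_eq_ediv_of_pos (by norm_num),
      PySem.Int.floordiv_eq_ediv_of_pos (by norm_num), h1, h2]
  omega

-- the list innerA returns is the input list with every element shifted right once
theorem innerA_snd (L : List Int) (C c : Int) :
    (innerA L C c).2 = L.map (fun x : Int => x >>> (1 : Nat)) := by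
  induction L generalizing C c with
  | nil => rfl
  | cons x xs ih =>
    by_cases h : PySem.Int.band x 1 ≠ 0 <;> simp [innerA, h, ih]

theorem map_shift (L : List Int) (b : Nat) :
    (L.map (fun x : Int => x >>> b)).map (fun x : Int => x >>> (1 : Nat))
      = L.map (fun x : Int => x >>> (b + 1)) := by
  rw [List.map_map]
  refine List.map_congr_left fun x _ => ?_
  simp [Function.comp, Int.shiftRight_add]

-- the per-bit invariant tying A's triangular-count state to B's last-index state
theorem key (b : Nat) (L : List Int) : ∀ (C c j CB : Int),
    (innerA (L.map (fun x : Int => x >>> b)) C c).1.1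
        - cntA (innerA (L.map (fun x : Int => x >>> b)) C c).1.2
      = C - cntA c
        + (innerB L b j (j - 1 - c) CB - CB - (cntA (j + (L.length : Int)) - cntA j)) := by
  induction L with
  | nil => intro C c j CB; simp [innerA, innerB]
  | cons x xs ih =>
    intro C c j CB
    by_cases h : PySem.Int.band (x >>> b) 1 ≠ 0
    · simp only [List.map_cons, innerA, innerB, h, if_pos, ne_eq, not_false_iff, if_true]
      have hA := ih (C - cntA c) 0 (j + 1) (CB + j + 1)
      have he : (j : Int) + 1 - 1 - 0 = j := by ring
      rw [he] at hA
      rw [hA]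
      have h1 := cntA_succ j
      have h3 : cntA ((j : Int) + ((xs.length : Int) + 1)) = cntA (j + 1 + (xs.length : Int)) := by
        congr 1; ring
      simp only [List.length_cons]
      push_cast
      rw [h3]
      linarith [h1, cntA_zero]
    · simp only [List.map_cons, innerA, innerB, h, if_neg, if_false, ne_eq, not_false_iff]
      have hA := ih C (c + 1) (j + 1) (CB + (j - 1 - c) + 1)
      have he : (j : Int) + 1 - 1 - (c + 1) = j - 1 - c := by ring
      rw [he] at hA
      rw [hA]
      have h1 := cntA_succ j
      have h2 := cntA_succ c
      have h3 : cntA ((j : Int) + ((xs.length : Int) + 1)) = cntA (j + 1 + (xs.length : Int)) := by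
        congr 1; ring
      simp only [List.length_cons]
      push_cast
      rw [h3]
      linarith [h1, h2]

-- one round of A's outer loop equals one round of B's, and shifts the list once more
theorem step_eq (A : List Int) (s : Nat) (ans : Int) :
    stepA (PySem.List.len A) (ans, A.map (fun x : Int => x >>> s)) s
      = (stepB A ans s, A.map (fun x : Int => x >>> (s + 1))) := by
  have hk := key s A (cntA (PySem.List.len A)) 0 0 0
  have he : (0 : Int) - 1 - 0 = -1 := by ring
  rw [he] at hk
  have hlen : PySem.List.len A = (A.length : Int) := by simp [pysem]
  have hk2 : (innerA (A.map (fun x : Int => x >>> s)) (cntA (PySem.List.len A)) 0).1.1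
      - cntA (innerA (A.map (fun x : Int => x >>> s)) (cntA (PySem.List.len A)) 0).1.2
      = innerB A s 0 (-1) 0 := by
    rw [hk, cntA_zero, hlen, zero_add]; ring
  simp only [stepA, stepB]
  rw [innerA_snd, map_shift, hk2]

-- A's outer fold, started on the s-times-shifted list, equals B's outer fold
theorem outer (A : List Int) : ∀ (k s : Nat) (ans : Int),
    ((List.range' s k).foldl (stepA (PySem.List.len A)) (ans, A.map (fun x : Int => x >>> s))).1
      = (List.range' s k).foldl (stepB A) ans := by
  intro k
  induction k with
  | zero => intro s ans; rfl
  | succ k ih =>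
    intro s ans
    rw [List.range'_succ, List.foldl_cons, List.foldl_cons, step_eq]
    exact ih (s + 1) (stepB A ans s)

-- ===== VERDICT (by name: the statement is the Claim_ definition above) =====
theorem solve_spec : Claim_equal_solve := by
  intro A _
  unfold Spec_solve solve solve_alt
  have h0 : A.map (fun x : Int => x >>> (0 : Nat)) = A := by
    simp [Int.shiftRight_zero]
  have := outer A 27 0 0
  rw [h0] at this
  rw [List.range_eq_range']
  exact this
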